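-- pv_equiv track=rewrite | github.com/KevinConti/SmartPalette | smartpalette/Algorithm/ColorPaletteGenerator.py | refine_mean
-- ===== SOURCE A (Python) =====
-- def refine_mean(palette_num, catlist, xlist, ylist, zlist, xmeans, ymeans, zmeans):
--     newxmeans = []
--     newymeans = []
--     newzmeans = []
--
--     change = 0
--     for j in range(palette_num):
--         xsum = ysum = zsum = catcount = count = 0
--
--         for cat in catlist:
--             if cat == j:
--                 x = xlist[count]
--                 y = ylist[count]
--                 z = zlist[count]
--
--                 xsum += x
--                 ysum += y
--                 zsum += z
--                 catcount += 1
--             count += 1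
--
--         if count != 0 and catcount !=0:
--             meanx = xsum//catcount
--             meany = ysum//catcount
--             meanz = zsum//catcount
--
--             change += abs(meanx-xmeans[j])
--
--             newxmeans.append(meanx)
--             newymeans.append(meany)
--             newzmeans.append(meanz)
--         elif catcount != 0:
--             newxmeans.append(xmeans[j])
--             newymeans.append(ymeans[j])
--             newzmeans.append(zmeans[j])
--
--         else:
--             newxmeans.append(None)
--             newymeans.append(None)
--             newzmeans.append(None)
--     return newxmeans, newymeans, newzmeans, change
-- ===== SOURCE B (Python) =====
-- def refine_mean(palette_num, catlist, xlist, ylist, zlist, xmeans, ymeans, zmeans):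
--     k = palette_num if palette_num > 0 else 0
--     xsums = [0] * k
--     ysums = [0] * k
--     zsums = [0] * k
--     counts = [0] * k
--     for i, cat in enumerate(catlist):
--         if 0 <= cat < palette_num:
--             xsums[cat] += xlist[i]
--             ysums[cat] += ylist[i]
--             zsums[cat] += zlist[i]
--             counts[cat] += 1
--     newxmeans = []
--     newymeans = []
--     newzmeans = []
--     change = 0
--     for j in range(k):
--         c = counts[j]
--         if c:
--             meanx = xsums[j] // c
--             change += abs(meanx - xmeans[j])
--             newxmeans.append(meanx)
--             newymeans.append(ysums[j] // c)
--             newzmeans.append(zsums[j] // c)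
--         else:
--             newxmeans.append(None)
--             newymeans.append(None)
--             newzmeans.append(None)
--     return newxmeans, newymeans, newzmeans, change
-- ===== Notes on version B (the rewrite author's own statement) =====
-- stated objective: faster
-- what changed: Instead of re-scanning the whole catlist once per palette category (K nested scans), B makes one pass over catlist accumulating per-category sums and counts into size-K arrays and then computes the means in a single pass over the categories.
import Mathlib
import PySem

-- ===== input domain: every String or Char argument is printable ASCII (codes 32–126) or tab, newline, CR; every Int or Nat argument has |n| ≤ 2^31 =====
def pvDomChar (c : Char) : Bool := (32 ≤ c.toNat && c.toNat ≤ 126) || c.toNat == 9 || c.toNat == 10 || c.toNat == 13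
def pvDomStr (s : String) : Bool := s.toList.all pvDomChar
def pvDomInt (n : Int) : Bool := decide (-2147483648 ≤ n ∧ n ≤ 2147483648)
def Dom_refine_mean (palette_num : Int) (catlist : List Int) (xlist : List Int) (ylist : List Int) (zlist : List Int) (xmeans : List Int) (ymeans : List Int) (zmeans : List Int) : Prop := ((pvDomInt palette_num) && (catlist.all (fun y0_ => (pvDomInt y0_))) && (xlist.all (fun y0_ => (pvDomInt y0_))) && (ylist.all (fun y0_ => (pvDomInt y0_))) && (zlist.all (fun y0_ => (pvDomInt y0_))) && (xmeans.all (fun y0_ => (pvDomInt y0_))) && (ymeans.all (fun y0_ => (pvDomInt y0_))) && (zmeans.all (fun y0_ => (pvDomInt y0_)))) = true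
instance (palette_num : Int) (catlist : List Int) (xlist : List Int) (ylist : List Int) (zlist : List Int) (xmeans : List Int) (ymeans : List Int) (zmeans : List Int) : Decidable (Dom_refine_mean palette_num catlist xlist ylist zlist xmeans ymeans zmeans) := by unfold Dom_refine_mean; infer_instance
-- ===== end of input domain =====

-- B replaces A's K re-scans of catlist (one per palette category) by a single pass
-- accumulating per-category sums/counts into size-K arrays: O(N+K) instead of O(K*N).

-- ===== PORT A =====
def refine_mean (palette_num : Int) (catlist : List Int) (xlist : List Int) (ylist : List Int) (zlist : List Int) (xmeans : List Int) (ymeans : List Int) (zmeans : List Int) : List (Option Int) × List (Option Int) × List (Option Int) × Int :=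
  (PySem.List.pyRange 0 palette_num 1).foldl
    (fun (acc : List (Option Int) × List (Option Int) × List (Option Int) × Int) j =>
      -- inner loop: state = (xsum, ysum, zsum, catcount, count)
      let s := catlist.foldl
        (fun (s : Int × Int × Int × Int × Int) cat =>
          if cat = j then
            (s.1 + PySem.List.pyGetD xlist s.2.2.2.2 0,
             s.2.1 + PySem.List.pyGetD ylist s.2.2.2.2 0,
             s.2.2.1 + PySem.List.pyGetD zlist s.2.2.2.2 0,
             s.2.2.2.1 + 1,
             s.2.2.2.2 + 1)
          else
            (s.1, s.2.1, s.2.2.1, s.2.2.2.1, s.2.2.2.2 + 1))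
        (0, 0, 0, 0, 0)
      if s.2.2.2.2 ≠ 0 ∧ s.2.2.2.1 ≠ 0 then
        let meanx := PySem.Int.floordiv s.1 s.2.2.2.1
        let meany := PySem.Int.floordiv s.2.1 s.2.2.2.1
        let meanz := PySem.Int.floordiv s.2.2.1 s.2.2.2.1
        (acc.1 ++ [some meanx], acc.2.1 ++ [some meany], acc.2.2.1 ++ [some meanz],
         acc.2.2.2 + |meanx - PySem.List.pyGetD xmeans j 0|)
      else if s.2.2.2.1 ≠ 0 then
        (acc.1 ++ [some (PySem.List.pyGetD xmeans j 0)],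
         acc.2.1 ++ [some (PySem.List.pyGetD ymeans j 0)],
         acc.2.2.1 ++ [some (PySem.List.pyGetD zmeans j 0)],
         acc.2.2.2)
      else
        (acc.1 ++ [none], acc.2.1 ++ [none], acc.2.2.1 ++ [none], acc.2.2.2))
    ([], [], [], 0)

-- ===== PORT B =====
def refine_mean_alt (palette_num : Int) (catlist : List Int) (xlist : List Int) (ylist : List Int) (zlist : List Int) (xmeans : List Int) (ymeans : List Int) (zmeans : List Int) : List (Option Int) × List (Option Int) × List (Option Int) × Int :=
  let k := palette_num.toNat
  -- one pass over catlist: size-k accumulator arrays (xsums, ysums, zsums, counts)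
  let st := (PySem.List.enumerate catlist 0).foldl
    (fun (s : List Int × List Int × List Int × List Int) (p : Int × Int) =>
      if 0 ≤ p.2 ∧ p.2 < palette_num then
        let t := p.2.toNat
        (s.1.set t (s.1.getD t 0 + PySem.List.pyGetD xlist p.1 0),
         s.2.1.set t (s.2.1.getD t 0 + PySem.List.pyGetD ylist p.1 0),
         s.2.2.1.set t (s.2.2.1.getD t 0 + PySem.List.pyGetD zlist p.1 0),
         s.2.2.2.set t (s.2.2.2.getD t 0 + 1))
      else s)
    (List.replicate k 0, List.replicate k 0, List.replicate k 0, List.replicate k 0)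
  -- one pass over the k categories: compute the means
  (List.range k).foldl
    (fun (acc : List (Option Int) × List (Option Int) × List (Option Int) × Int) t =>
      let c := st.2.2.2.getD t 0
      if c ≠ 0 then
        let meanx := PySem.Int.floordiv (st.1.getD t 0) c
        (acc.1 ++ [some meanx],
         acc.2.1 ++ [some (PySem.Int.floordiv (st.2.1.getD t 0) c)],
         acc.2.2.1 ++ [some (PySem.Int.floordiv (st.2.2.1.getD t 0) c)],
         acc.2.2.2 + |meanx - xmeans.getD t 0|)
      else
        (acc.1 ++ [none], acc.2.1 ++ [none], acc.2.2.1 ++ [none], acc.2.2.2))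
    ([], [], [], 0)

-- ===== PRECONDITION & SPEC =====
-- Pre_ excludes exactly the inputs where the Python A raises IndexError: a position i of
-- catlist whose category lies in range(palette_num) but i is out of range for xlist/ylist/zlist,
-- or a category j present in catlist with j out of range for xmeans.
def Pre_refine_mean (palette_num : Int) (catlist : List Int) (xlist : List Int) (ylist : List Int) (zlist : List Int) (xmeans : List Int) (ymeans : List Int) (zmeans : List Int) : Prop :=
  (∀ i < catlist.length, (0 ≤ catlist.getD i 0 ∧ catlist.getD i 0 < palette_num) →
      (i < xlist.length ∧ i < ylist.length ∧ i < zlist.length))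
  ∧ (∀ c ∈ catlist, 0 ≤ c → c < palette_num → c.toNat < xmeans.length)
instance (palette_num : Int) (catlist : List Int) (xlist : List Int) (ylist : List Int) (zlist : List Int) (xmeans : List Int) (ymeans : List Int) (zmeans : List Int) : Decidable (Pre_refine_mean palette_num catlist xlist ylist zlist xmeans ymeans zmeans) := by unfold Pre_refine_mean; infer_instance

def pvWitness_refine_mean : Int × List Int × List Int × List Int × List Int × List Int × List Int × List Int :=
  (3, [0, 1, 0], [3, 4, 5], [5, 6, 7], [7, 8, 9], [1, 2, 3], [1, 2, 3], [1, 2, 3])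

def Spec_refine_mean (palette_num : Int) (catlist : List Int) (xlist : List Int) (ylist : List Int) (zlist : List Int) (xmeans : List Int) (ymeans : List Int) (zmeans : List Int) (out : List (Option Int) × List (Option Int) × List (Option Int) × Int) : Prop := out = refine_mean_alt palette_num catlist xlist ylist zlist xmeans ymeans zmeans
instance (palette_num : Int) (catlist : List Int) (xlist : List Int) (ylist : List Int) (zlist : List Int) (xmeans : List Int) (ymeans : List Int) (zmeans : List Int) (out : List (Option Int) × List (Option Int) × List (Option Int) × Int) : Decidable (Spec_refine_mean palette_num catlist xlist ylist zlist xmeans ymeans zmeans out) := by unfold Spec_refine_mean; infer_instance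

-- ===== CLAIM (what is proved, stated in full; the proofs are below) =====
def Claim_equal_refine_mean : Prop := ∀ (palette_num : Int) (catlist : List Int) (xlist : List Int) (ylist : List Int) (zlist : List Int) (xmeans : List Int) (ymeans : List Int) (zmeans : List Int), Dom_refine_mean palette_num catlist xlist ylist zlist xmeans ymeans zmeans → Pre_refine_mean palette_num catlist xlist ylist zlist xmeans ymeans zmeans → Spec_refine_mean palette_num catlist xlist ylist zlist xmeans ymeans zmeans (refine_mean palette_num catlist xlist ylist zlist xmeans ymeans zmeans)

-- ===== LEMMAS AND PROOFS =====

-- the sum of vals[i] over the positions i ≥ i0 of cats (read from position i0 on) whose category is j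
def pvBSum (vals : List Int) (cats : List Int) (j : Int) (i0 : Nat) : Int :=
  match cats with
  | [] => 0
  | c :: cs => (if c = j then vals.getD i0 0 else 0) + pvBSum vals cs j (i0 + 1)

-- the per-category entry both programs append for category j
def pvEntry (catlist xlist ylist zlist xmeans : List Int) (j : Int) : Option Int × Option Int × Option Int × Int :=
  let C : Int := (catlist.count j : Int)
  if C ≠ 0 then
    (some (PySem.Int.floordiv (pvBSum xlist catlist j 0) C),
     some (PySem.Int.floordiv (pvBSum ylist catlist j 0) C),
     some (PySem.Int.floordiv (pvBSum zlist catlist j 0) C),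
     |PySem.Int.floordiv (pvBSum xlist catlist j 0) C - xmeans.getD j.toNat 0|)
  else (none, none, none, 0)

lemma pvGetD_of_nonneg (xs : List Int) (i : Int) (h : 0 ≤ i) :
    PySem.List.pyGetD xs i 0 = xs.getD i.toNat 0 := by
  obtain ⟨n, rfl⟩ := Int.eq_ofNat_of_zero_le h
  simp [PySem.List.pyGetD_natCast]

-- A's inner loop, characterised
lemma pvInnerA (xlist ylist zlist : List Int) (j : Int) :
    ∀ (cats : List Int) (i0 : Nat) (a b c d : Int),
    cats.foldl
      (fun (s : Int × Int × Int × Int × Int) cat =>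
        if cat = j then
          (s.1 + PySem.List.pyGetD xlist s.2.2.2.2 0,
           s.2.1 + PySem.List.pyGetD ylist s.2.2.2.2 0,
           s.2.2.1 + PySem.List.pyGetD zlist s.2.2.2.2 0,
           s.2.2.2.1 + 1,
           s.2.2.2.2 + 1)
        else (s.1, s.2.1, s.2.2.1, s.2.2.2.1, s.2.2.2.2 + 1))
      (a, b, c, d, (i0 : Int))
    = (a + pvBSum xlist cats j i0, b + pvBSum ylist cats j i0, c + pvBSum zlist cats j i0,
       d + (cats.count j : Int), ((i0 + cats.length : Nat) : Int)) := by
  intro cats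
  induction cats with
  | nil => intro i0 a b c d; simp [pvBSum]
  | cons c0 cs ih =>
    intro i0 a b c d
    have hcast : ((i0 : Int) + 1) = ((i0 + 1 : Nat) : Int) := by push_cast; ring
    by_cases h : c0 = j
    · simp only [List.foldl_cons, if_pos h]
      rw [hcast, ih (i0 + 1)]
      simp only [pvBSum, h, PySem.List.pyGetD_natCast, List.count_cons]
      refine Prod.ext ?_ (Prod.ext ?_ (Prod.ext ?_ (Prod.ext ?_ ?_))) <;> simp <;> push_cast <;> ring
    · simp only [List.foldl_cons, if_neg h]
      rw [hcast, ih (i0 + 1)]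
      simp only [pvBSum, if_neg h, List.count_cons]
      refine Prod.ext ?_ (Prod.ext ?_ (Prod.ext ?_ (Prod.ext ?_ ?_))) <;>
        simp [beq_iff_eq, h] <;> push_cast <;> ring

lemma pvGetD_set_self (l : List Int) (t : Nat) (v : Int) (h : t < l.length) :
    (l.set t v).getD t 0 = v := by
  simp [List.getD, h]

lemma pvGetD_set_ne (l : List Int) (t u : Nat) (v : Int) (h : t ≠ u) :
    (l.set t v).getD u 0 = l.getD u 0 := by
  simp [List.getD, List.getElem?_set_ne h]

-- B's fill loop as a named function (proof helper only; the port inlines the same fold)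
def pvFillLoop (pn : Int) (xlist ylist zlist : List Int) (cats : List Int) (s0 : Int)
    (st : List Int × List Int × List Int × List Int) : List Int × List Int × List Int × List Int :=
  (PySem.List.enumerate cats s0).foldl
    (fun (s : List Int × List Int × List Int × List Int) (p : Int × Int) =>
      if 0 ≤ p.2 ∧ p.2 < pn then
        let t := p.2.toNat
        (s.1.set t (s.1.getD t 0 + PySem.List.pyGetD xlist p.1 0),
         s.2.1.set t (s.2.1.getD t 0 + PySem.List.pyGetD ylist p.1 0),
         s.2.2.1.set t (s.2.2.1.getD t 0 + PySem.List.pyGetD zlist p.1 0),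
         s.2.2.2.set t (s.2.2.2.getD t 0 + 1))
      else s)
    st

lemma pvFillLoop_cons (pn : Int) (xlist ylist zlist : List Int) (c0 : Int) (cs : List Int)
    (s0 : Int) (st : List Int × List Int × List Int × List Int) :
    pvFillLoop pn xlist ylist zlist (c0 :: cs) s0 st =
      pvFillLoop pn xlist ylist zlist cs (s0 + 1)
        (if 0 ≤ c0 ∧ c0 < pn then
          (st.1.set c0.toNat (st.1.getD c0.toNat 0 + PySem.List.pyGetD xlist s0 0),
           st.2.1.set c0.toNat (st.2.1.getD c0.toNat 0 + PySem.List.pyGetD ylist s0 0),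
           st.2.2.1.set c0.toNat (st.2.2.1.getD c0.toNat 0 + PySem.List.pyGetD zlist s0 0),
           st.2.2.2.set c0.toNat (st.2.2.2.getD c0.toNat 0 + 1))
         else st) := by
  rw [pvFillLoop, pvFillLoop, PySem.List.enumerate_cons, List.foldl_cons]

-- B's fill loop, characterised
lemma pvFill (pn : Int) (xlist ylist zlist : List Int) :
    ∀ (cats : List Int) (i0 : Nat) (A B C D : List Int),
    pn.toNat ≤ A.length → pn.toNat ≤ B.length → pn.toNat ≤ C.length → pn.toNat ≤ D.length →
    ∀ j : Int, 0 ≤ j → j < pn →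
      (pvFillLoop pn xlist ylist zlist cats (i0 : Int) (A, B, C, D)).1.getD j.toNat 0
          = A.getD j.toNat 0 + pvBSum xlist cats j i0 ∧
      (pvFillLoop pn xlist ylist zlist cats (i0 : Int) (A, B, C, D)).2.1.getD j.toNat 0
          = B.getD j.toNat 0 + pvBSum ylist cats j i0 ∧
      (pvFillLoop pn xlist ylist zlist cats (i0 : Int) (A, B, C, D)).2.2.1.getD j.toNat 0
          = C.getD j.toNat 0 + pvBSum zlist cats j i0 ∧
      (pvFillLoop pn xlist ylist zlist cats (i0 : Int) (A, B, C, D)).2.2.2.getD j.toNat 0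
          = D.getD j.toNat 0 + (cats.count j : Int) := by
  intro cats
  induction cats with
  | nil =>
    intro i0 A B C D _ _ _ _ j _ _
    simp [pvFillLoop, PySem.List.enumerate_nil, pvBSum]
  | cons c0 cs ih =>
    intro i0 A B C D hA hB hC hD j hj0 hjpn
    have hcast : ((i0 : Int) + 1) = ((i0 + 1 : Nat) : Int) := by push_cast; ring
    rw [pvFillLoop_cons, hcast]
    by_cases hg : 0 ≤ c0 ∧ c0 < pn
    · rw [if_pos hg]
      have h1 : pn.toNat ≤ (A.set c0.toNat (A.getD c0.toNat 0 + PySem.List.pyGetD xlist (i0 : Int) 0)).length := by simpa using hA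
      have h2 : pn.toNat ≤ (B.set c0.toNat (B.getD c0.toNat 0 + PySem.List.pyGetD ylist (i0 : Int) 0)).length := by simpa using hB
      have h3 : pn.toNat ≤ (C.set c0.toNat (C.getD c0.toNat 0 + PySem.List.pyGetD zlist (i0 : Int) 0)).length := by simpa using hC
      have h4 : pn.toNat ≤ (D.set c0.toNat (D.getD c0.toNat 0 + 1)).length := by simpa using hD
      have key := ih (i0 + 1) _ _ _ _ h1 h2 h3 h4 j hj0 hjpn
      by_cases hc : c0 = j
      · subst hc
        have hlt0 : c0.toNat < A.length := by omega
        have hltB : c0.toNat < B.length := by omega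
        have hltC : c0.toNat < C.length := by omega
        have hltD : c0.toNat < D.length := by omega
        rw [key.1, key.2.1, key.2.2.1, key.2.2.2,
            pvGetD_set_self _ _ _ hlt0, pvGetD_set_self _ _ _ hltB,
            pvGetD_set_self _ _ _ hltC, pvGetD_set_self _ _ _ hltD]
        have hx := pvGetD_of_nonneg xlist (i0 : Int) (by positivity)
        have hy := pvGetD_of_nonneg ylist (i0 : Int) (by positivity)
        have hz := pvGetD_of_nonneg zlist (i0 : Int) (by positivity)
        simp only [pvBSum, List.count_cons, beq_self_eq_true, if_true, hx, hy, hz,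
          Int.toNat_natCast]
        refine ⟨by ring, by ring, by ring, by push_cast; ring⟩
      · have hne : c0.toNat ≠ j.toNat := by omega
        rw [key.1, key.2.1, key.2.2.1, key.2.2.2,
            pvGetD_set_ne _ _ _ _ hne, pvGetD_set_ne _ _ _ _ hne,
            pvGetD_set_ne _ _ _ _ hne, pvGetD_set_ne _ _ _ _ hne]
        simp only [pvBSum, if_neg hc, List.count_cons]
        refine ⟨by ring, by ring, by ring, by simp [hc]⟩
    · rw [if_neg hg]
      have hc : c0 ≠ j := fun h => hg (h ▸ ⟨hj0, hjpn⟩)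
      have key := ih (i0 + 1) A B C D hA hB hC hD j hj0 hjpn
      rw [key.1, key.2.1, key.2.2.1, key.2.2.2]
      simp only [pvBSum, if_neg hc, List.count_cons]
      refine ⟨by ring, by ring, by ring, by simp [hc]⟩

-- a loop appending one entry per element and summing a change accumulator
lemma pvFoldEntries {α : Type} (e1 e2 e3 : α → Option Int) (e4 : α → Int)
    (F : (List (Option Int) × List (Option Int) × List (Option Int) × Int) → α → (List (Option Int) × List (Option Int) × List (Option Int) × Int))
    (L : List α)
    (hF : ∀ acc x, x ∈ L → F acc x = (acc.1 ++ [e1 x], acc.2.1 ++ [e2 x], acc.2.2.1 ++ [e3 x], acc.2.2.2 + e4 x)) :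
    ∀ (a b c : List (Option Int)) (d : Int),
    L.foldl F (a, b, c, d) = (a ++ L.map e1, b ++ L.map e2, c ++ L.map e3, d + (L.map e4).sum) := by
  induction L with
  | nil => intro a b c d; simp
  | cons x xs ih =>
    intro a b c d
    simp only [List.foldl_cons]
    rw [hF _ _ (by simp)]
    rw [ih (fun acc y hy => hF acc y (by simp [hy])) _ _ _ _]
    simp [List.map_cons]
    ring

-- A's outer loop produces one pvEntry per category
lemma pvAeq (palette_num : Int) (catlist xlist ylist zlist xmeans ymeans zmeans : List Int) :
    refine_mean palette_num catlist xlist ylist zlist xmeans ymeans zmeans =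
      ((PySem.List.pyRange 0 palette_num 1).map (fun j => (pvEntry catlist xlist ylist zlist xmeans j).1),
       (PySem.List.pyRange 0 palette_num 1).map (fun j => (pvEntry catlist xlist ylist zlist xmeans j).2.1),
       (PySem.List.pyRange 0 palette_num 1).map (fun j => (pvEntry catlist xlist ylist zlist xmeans j).2.2.1),
       ((PySem.List.pyRange 0 palette_num 1).map (fun j => (pvEntry catlist xlist ylist zlist xmeans j).2.2.2)).sum) := by
  unfold refine_mean
  rw [pvFoldEntries (fun j => (pvEntry catlist xlist ylist zlist xmeans j).1)
      (fun j => (pvEntry catlist xlist ylist zlist xmeans j).2.1)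
      (fun j => (pvEntry catlist xlist ylist zlist xmeans j).2.2.1)
      (fun j => (pvEntry catlist xlist ylist zlist xmeans j).2.2.2) _ _ ?_ [] [] [] 0]
  · simp
  · intro acc j hj
    have hj0 : 0 ≤ j := (PySem.List.mem_pyRange_one.1 hj).1
    have hinner := pvInnerA xlist ylist zlist j catlist 0 0 0 0 0
    rw [Nat.cast_zero] at hinner
    simp only [zero_add] at hinner
    simp only [hinner]
    by_cases hC : catlist.count j = 0
    · rw [if_neg (show ¬ (((catlist.length : Nat) : Int) ≠ 0 ∧ ((catlist.count j : Nat) : Int) ≠ 0) by simp [hC])]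
      rw [if_neg (by simp [hC])]
      simp [pvEntry, hC]
    · have hlen : catlist.length ≠ 0 := by
        intro h
        rw [List.eq_nil_of_length_eq_zero h] at hC
        simp at hC
      rw [if_pos (show ((catlist.length : Nat) : Int) ≠ 0 ∧ ((catlist.count j : Nat) : Int) ≠ 0 from ⟨by simpa using hlen, by simpa using hC⟩)]
      simp only [pvEntry]
      rw [if_pos (by simpa using hC)]
      rw [pvGetD_of_nonneg xmeans j hj0]

-- B's second loop produces one pvEntry per category
lemma pvBeq (palette_num : Int) (catlist xlist ylist zlist xmeans ymeans zmeans : List Int) :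
    refine_mean_alt palette_num catlist xlist ylist zlist xmeans ymeans zmeans =
      ((List.range palette_num.toNat).map (fun t : Nat => (pvEntry catlist xlist ylist zlist xmeans (t : Int)).1),
       (List.range palette_num.toNat).map (fun t : Nat => (pvEntry catlist xlist ylist zlist xmeans (t : Int)).2.1),
       (List.range palette_num.toNat).map (fun t : Nat => (pvEntry catlist xlist ylist zlist xmeans (t : Int)).2.2.1),
       ((List.range palette_num.toNat).map (fun t : Nat => (pvEntry catlist xlist ylist zlist xmeans (t : Int)).2.2.2)).sum) := by
  simp only [refine_mean_alt]
  have hrep : ∀ t : Nat, (List.replicate palette_num.toNat (0 : Int)).getD t 0 = 0 := by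
    intro t
    simp [List.getD, List.getElem?_replicate]
    split <;> rfl
  have hfill := pvFill palette_num xlist ylist zlist catlist 0
      (List.replicate palette_num.toNat 0) (List.replicate palette_num.toNat 0)
      (List.replicate palette_num.toNat 0) (List.replicate palette_num.toNat 0)
      (by simp) (by simp) (by simp) (by simp)
  rw [Nat.cast_zero] at hfill
  simp only [pvFillLoop] at hfill
  rw [pvFoldEntries (fun t : Nat => (pvEntry catlist xlist ylist zlist xmeans (t : Int)).1)
      (fun t : Nat => (pvEntry catlist xlist ylist zlist xmeans (t : Int)).2.1)
      (fun t : Nat => (pvEntry catlist xlist ylist zlist xmeans (t : Int)).2.2.1)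
      (fun t : Nat => (pvEntry catlist xlist ylist zlist xmeans (t : Int)).2.2.2) _ _ ?_ [] [] [] 0]
  · simp
  · intro acc t ht
    have htk : t < palette_num.toNat := List.mem_range.1 ht
    have ht0 : (0 : Int) ≤ (t : Int) := by positivity
    have htpn : (t : Int) < palette_num := by omega
    have key := hfill (t : Int) ht0 htpn
    rw [hrep] at key
    simp only [Int.toNat_natCast, zero_add] at key
    simp only [key.1, key.2.1, key.2.2.1, key.2.2.2]
    by_cases hC : catlist.count (t : Int) = 0
    · rw [if_neg (by simpa using hC)]
      simp [pvEntry, hC]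
    · rw [if_pos (by simpa using hC)]
      simp only [pvEntry]
      rw [if_pos (by simpa using hC)]
      simp

-- ===== VERDICT (by name: the statement is the Claim_ definition above) =====
theorem refine_mean_spec : Claim_equal_refine_mean := by
  intro palette_num catlist xlist ylist zlist xmeans ymeans zmeans _ _
  unfold Spec_refine_mean
  rw [pvAeq, pvBeq]
  rw [PySem.List.pyRange_one]
  simp [List.map_map, Function.comp_def]
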